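-- pv_equiv track=rewrite | github.com/willialso/launchfirst | pharma_mlr/scripts/train/master_pipeline.py | match_title21_rules
-- ===== SOURCE A (Python) =====
-- def match_title21_rules(text, rules):
--     """Return a list of rules (titles or regulations) whose key_term appears in the text."""
--     matches = []
--     lower_text = text.lower()
--     for rule in rules:
--         key_term = rule.get("key_term", "").lower()
--         if key_term and key_term in lower_text:
--             matches.append(rule.get("regulation", "Unknown"))
--     return matches if matches else ["No match"]
-- ===== SOURCE B (Python) =====
-- def match_title21_rules(text, rules):
--     """Return a list of rules (titles or regulations) whose key_term appears in the text."""
--     lower_text = text.lower()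
--     n = len(lower_text)
--     terms = [rule.get("key_term", "").lower() for rule in rules]
--     lengths = {len(t) for t in terms if 0 < len(t) <= n}
--     windows = set()
--     for L in lengths:
--         for i in range(n - L + 1):
--             windows.add(lower_text[i:i + L])
--     out = [rule.get("regulation", "Unknown") for t, rule in zip(terms, rules) if t in windows]
--     return out if out else ["No match"]
-- ===== Notes on version B (the rewrite author's own statement) =====
-- stated objective: alternative
-- what changed: B replaces A's per-rule substring scan of the text with a multi-pattern text-side algorithm: it collects the distinct key_term lengths, makes one sliding-window pass over the text per distinct length inserting every window into a set, and then emits regulations by constant-time set lookups.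
import Mathlib
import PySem

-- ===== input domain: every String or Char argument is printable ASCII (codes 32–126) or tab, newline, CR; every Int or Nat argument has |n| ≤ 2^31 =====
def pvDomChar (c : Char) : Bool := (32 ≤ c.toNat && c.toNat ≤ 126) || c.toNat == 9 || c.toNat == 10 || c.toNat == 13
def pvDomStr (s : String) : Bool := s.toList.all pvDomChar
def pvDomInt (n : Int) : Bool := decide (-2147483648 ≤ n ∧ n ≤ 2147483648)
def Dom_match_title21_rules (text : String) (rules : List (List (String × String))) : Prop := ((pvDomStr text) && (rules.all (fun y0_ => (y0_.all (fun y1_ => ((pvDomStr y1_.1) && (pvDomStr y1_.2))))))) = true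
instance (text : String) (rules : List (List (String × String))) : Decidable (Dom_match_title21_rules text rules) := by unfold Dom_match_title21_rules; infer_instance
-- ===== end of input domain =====

-- B replaces A's per-rule substring scan with a text-side multi-pattern search: one sliding-window
-- pass over the text per distinct key_term length fills a set of windows, then rules are emitted by
-- set lookup; same return value as A on every input (both are total).

-- ===== PORT A =====
def match_title21_rules (text : String) (rules : List (List (String × String))) : List String :=
  let lowerText := PySem.Str.lower text
  let matchesL := rules.foldl (fun acc rule =>
    let keyTerm := PySem.Str.lower (PySem.Dict.getD (PySem.Dict.mk rule) "key_term" "")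
    if !(keyTerm == "") && PySem.Str.isIn keyTerm lowerText then
      acc ++ [PySem.Dict.getD (PySem.Dict.mk rule) "regulation" "Unknown"]
    else acc) []
  if matchesL.isEmpty then ["No match"] else matchesL

-- ===== PORT B =====
def match_title21_rules_alt (text : String) (rules : List (List (String × String))) : List String :=
  let lowerText := PySem.Str.lower text
  let n : Int := PySem.Str.len lowerText
  let terms := rules.map (fun rule => PySem.Str.lower (PySem.Dict.getD (PySem.Dict.mk rule) "key_term" ""))
  let lengths : PySem.Set Int :=
    PySem.Set.ofList ((terms.filter (fun t => decide (0 < PySem.Str.len t) && decide (PySem.Str.len t ≤ n))).map PySem.Str.len)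
  let windows : PySem.Set String :=
    lengths.foldl (fun w L =>
      (PySem.List.pyRange 0 (n - L + 1) 1).foldl (fun w i =>
        PySem.Set.add w (PySem.Str.slice lowerText (some i) (some (i + L)))) w)
      PySem.Set.empty
  let out := (terms.zip rules).filterMap (fun p =>
    if PySem.Set.contains windows p.1 then
      some (PySem.Dict.getD (PySem.Dict.mk p.2) "regulation" "Unknown")
    else none)
  if out.isEmpty then ["No match"] else out

-- ===== PRECONDITION & SPEC =====
def Spec_match_title21_rules (text : String) (rules : List (List (String × String))) (out : List String) : Prop := out = match_title21_rules_alt text rules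
instance (text : String) (rules : List (List (String × String))) (out : List String) : Decidable (Spec_match_title21_rules text rules out) := by unfold Spec_match_title21_rules; infer_instance

-- ===== CLAIM (what is proved, stated in full; the proofs are below) =====
def Claim_equal_match_title21_rules : Prop := ∀ (text : String) (rules : List (List (String × String))), Dom_match_title21_rules text rules → Spec_match_title21_rules text rules (match_title21_rules text rules)

-- ===== LEMMAS AND PROOFS =====

lemma mem_foldl_add {α β : Type} [BEq α] [LawfulBEq α] (l : List β) (f : β → α) (w : PySem.Set α) (x : α) :
    x ∈ l.foldl (fun w i => PySem.Set.add w (f i)) w ↔ x ∈ w ∨ ∃ i ∈ l, f i = x := by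
  induction l generalizing w with
  | nil => simp
  | cons a t ih =>
    simp only [List.foldl_cons, ih, PySem.Set.mem_add, List.mem_cons]
    constructor
    · rintro ((h | h) | ⟨i, hi, rfl⟩)
      · exact Or.inl h
      · exact Or.inr ⟨a, Or.inl rfl, h.symm⟩
      · exact Or.inr ⟨i, Or.inr hi, rfl⟩
    · rintro (h | ⟨i, (rfl | hi), rfl⟩)
      · exact Or.inl (Or.inl h)
      · exact Or.inl (Or.inr rfl)
      · exact Or.inr ⟨i, hi, rfl⟩

lemma mem_foldl_foldl_add {α β : Type} [BEq α] [LawfulBEq α] (l : List β) (bnd : β → Int)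
    (f : β → Int → α) (w : PySem.Set α) (x : α) :
    x ∈ l.foldl (fun w L => (PySem.List.pyRange 0 (bnd L) 1).foldl
        (fun w i => PySem.Set.add w (f L i)) w) w
      ↔ x ∈ w ∨ ∃ L ∈ l, ∃ i ∈ PySem.List.pyRange 0 (bnd L) 1, f L i = x := by
  induction l generalizing w with
  | nil => simp
  | cons a t ih =>
    simp only [List.foldl_cons, ih, mem_foldl_add, List.mem_cons]
    constructor
    · rintro ((h | ⟨i, hi, rfl⟩) | ⟨L, hL, i, hi, rfl⟩)
      · exact Or.inl h
      · exact Or.inr ⟨a, Or.inl rfl, i, hi, rfl⟩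
      · exact Or.inr ⟨L, Or.inr hL, i, hi, rfl⟩
    · rintro (h | ⟨L, (rfl | hL), i, hi, rfl⟩)
      · exact Or.inl (Or.inl h)
      · exact Or.inl (Or.inr ⟨i, hi, rfl⟩)
      · exact Or.inr ⟨L, hL, i, hi, rfl⟩

lemma mem_windows_char (lowerText : String) (terms : List String) (t : String) (ht : t ∈ terms) :
    (t ∈ (PySem.Set.ofList ((terms.filter (fun t => decide (0 < PySem.Str.len t) && decide (PySem.Str.len t ≤ PySem.Str.len lowerText))).map PySem.Str.len)).foldl
        (fun w L => (PySem.List.pyRange 0 (PySem.Str.len lowerText - L + 1) 1).foldl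
          (fun w i => PySem.Set.add w (PySem.Str.slice lowerText (some i) (some (i + L)))) w)
        PySem.Set.empty)
      ↔ (¬ t = "" ∧ PySem.Str.isIn t lowerText = true) := by
  rw [mem_foldl_foldl_add]
  constructor
  · rintro (h | ⟨L, hL, i, hi, rfl⟩)
    · simp [PySem.Set.empty] at h
    · rw [PySem.Set.mem_ofList] at hL
      obtain ⟨t', ht', hLt⟩ := List.mem_map.mp hL
      obtain ⟨_, hcond⟩ := List.mem_filter.mp ht'
      rw [Bool.and_eq_true, decide_eq_true_eq, decide_eq_true_eq] at hcond
      rw [hLt] at hcond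
      simp only [PySem.Str.len_eq] at hcond
      rw [PySem.List.mem_pyRange_one] at hi
      simp only [PySem.Str.len_eq] at hi
      obtain ⟨hi0, hi1⟩ := hi
      have hlist : (PySem.Str.slice lowerText (some i) (some (i + L))).toList
          = (lowerText.toList.drop i.toNat).take L.toNat := by
        have := PySem.List.slice_toNat lowerText.toList hi0 (by omega : (0:Int) ≤ i + L)
        simp only [PySem.Str.toList_slice, PySem.Chars.slice_eq_listSlice, this]
        congr 1
        omega
      have hlen : (PySem.Str.slice lowerText (some i) (some (i + L))).toList.length = L.toNat := by
        rw [hlist]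
        simp only [List.length_take, List.length_drop]
        omega
      constructor
      · intro hc
        rw [hc] at hlen
        simp at hlen
        omega
      · have : PySem.Chars.isIn (PySem.Str.slice lowerText (some i) (some (i + L))).toList lowerText.toList = true :=
          (PySem.Chars.exists_prefix_drop_iff_isIn _ _).mp ⟨i.toNat, by rw [hlist]; exact List.take_prefix _ _⟩
        simpa using this
  · rintro ⟨hne, hin⟩
    have hin' : PySem.Chars.isIn t.toList lowerText.toList = true := by simpa using hin
    obtain ⟨j, hj⟩ := (PySem.Chars.exists_prefix_drop_iff_isIn _ _).mpr hin'
    have hlen0 : t.toList ≠ [] := fun hc => hne (String.toList_inj.mp (by simp [hc]))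
    have hlt : 0 < t.toList.length := List.length_pos_iff.mpr hlen0
    have hle : j + t.toList.length ≤ lowerText.toList.length := by
      have := hj.length_le
      simp only [List.length_drop] at this
      omega
    refine Or.inr ⟨PySem.Str.len t, ?_, (j : Int), ?_, ?_⟩
    · rw [PySem.Set.mem_ofList]
      refine List.mem_map.mpr ⟨t, List.mem_filter.mpr ⟨ht, ?_⟩, rfl⟩
      simp only [PySem.Str.len_eq, Bool.and_eq_true, decide_eq_true_eq]
      constructor
      · exact_mod_cast hlt
      · exact_mod_cast (by omega : t.toList.length ≤ lowerText.toList.length)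
    · rw [PySem.List.mem_pyRange_one]
      simp only [PySem.Str.len_eq]
      constructor
      · positivity
      · omega
    · apply String.toList_inj.mp
      have hs := PySem.List.slice_toNat (xs := lowerText.toList)
        (show (0:Int) ≤ (j:Int) by positivity)
        (show (0:Int) ≤ (j:Int) + PySem.Str.len t by simp only [PySem.Str.len_eq]; positivity)
      simp only [PySem.Str.toList_slice, PySem.Chars.slice_eq_listSlice, hs]
      have h1 : ((j:Int) + PySem.Str.len t).toNat - ((j:Int)).toNat = t.toList.length := by
        simp only [PySem.Str.len_eq]; omega
      have h2 : ((j:Int)).toNat = j := Int.toNat_natCast j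
      rw [h1, h2]
      exact (List.prefix_iff_eq_take.mp hj).symm

-- Set.contains as membership (LawfulBEq).
lemma contains_true_iff {α : Type} [BEq α] [LawfulBEq α] (w : PySem.Set α) (x : α) :
    PySem.Set.contains w x = true ↔ x ∈ w := by
  simp [PySem.Set.contains_eq_listContains]

-- B's zip/filterMap stage equals filter-then-map when the membership test agrees pointwise.
lemma zip_filterMap_eq (rules : List (List (String × String)))
    (g : List (String × String) → String) (M : String → Bool)
    (p : List (String × String) → Bool) (f : List (String × String) → String)
    (h : ∀ r ∈ rules, M (g r) = p r) :
    ((rules.map g).zip rules).filterMap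
        (fun q => if M q.1 then some (f q.2) else none)
      = (rules.filter p).map f := by
  induction rules with
  | nil => rfl
  | cons r rs ih =>
    have hr : M (g r) = p r := h r (List.mem_cons_self)
    have ihr := ih (fun x hx => h x (List.mem_cons_of_mem r hx))
    cases hp : p r <;> simp [hr, hp, ihr]

theorem match_title21_rules_equal (text : String) (rules : List (List (String × String))) :
    match_title21_rules text rules = match_title21_rules_alt text rules := by
  unfold match_title21_rules match_title21_rules_alt
  simp only []
  rw [PySem.List.foldl_append_if
        (p := fun rule => !(PySem.Str.lower (PySem.Dict.getD (PySem.Dict.mk rule) "key_term" "") == "")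
                && PySem.Str.isIn (PySem.Str.lower (PySem.Dict.getD (PySem.Dict.mk rule) "key_term" "")) (PySem.Str.lower text))
        (f := fun rule => PySem.Dict.getD (PySem.Dict.mk rule) "regulation" "Unknown")]
  rw [zip_filterMap_eq rules
        (g := fun rule => PySem.Str.lower (PySem.Dict.getD (PySem.Dict.mk rule) "key_term" ""))
        (M := fun t => PySem.Set.contains
          ((PySem.Set.ofList (((rules.map (fun rule => PySem.Str.lower (PySem.Dict.getD (PySem.Dict.mk rule) "key_term" ""))).filter
              (fun t => decide (0 < PySem.Str.len t) && decide (PySem.Str.len t ≤ PySem.Str.len (PySem.Str.lower text)))).map PySem.Str.len)).foldl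
            (fun w L => (PySem.List.pyRange 0 (PySem.Str.len (PySem.Str.lower text) - L + 1) 1).foldl
              (fun w i => PySem.Set.add w (PySem.Str.slice (PySem.Str.lower text) (some i) (some (i + L)))) w)
            PySem.Set.empty) t)
        (p := fun rule => !(PySem.Str.lower (PySem.Dict.getD (PySem.Dict.mk rule) "key_term" "") == "")
                && PySem.Str.isIn (PySem.Str.lower (PySem.Dict.getD (PySem.Dict.mk rule) "key_term" "")) (PySem.Str.lower text))
        (f := fun rule => PySem.Dict.getD (PySem.Dict.mk rule) "regulation" "Unknown")
        (fun r hr => by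
          have hmem := mem_windows_char (PySem.Str.lower text)
            (rules.map (fun rule => PySem.Str.lower (PySem.Dict.getD (PySem.Dict.mk rule) "key_term" "")))
            (PySem.Str.lower (PySem.Dict.getD (PySem.Dict.mk r) "key_term" ""))
            (List.mem_map_of_mem hr)
          rw [Bool.eq_iff_iff, contains_true_iff, hmem]
          simp)]
  simp

-- ===== VERDICT (by name: the statement is the Claim_ definition above) =====
theorem match_title21_rules_spec : Claim_equal_match_title21_rules := by
  intro text rules _
  exact match_title21_rules_equal text rules
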